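-- pv_equiv track=rewrite | github.com/Salies/si-a1 | sombra.py | rev_subs
-- ===== SOURCE A (Python) =====
-- def rev_subs(string, key):
--     n = len(key)
--     # Rotaciona cada caractere da string em 7 posições à direita,
--     # assim revertendo a cifragem por substituição
--     # Exemplo: 't' -> 'a'
--     for i in range(len(string)):
--         val = ord(string[i]) + n
--         if val > 255:
--             val -= 256
--         string = string[:i] + chr(val) + string[i+1:]
--     return string
-- ===== SOURCE B (Python) =====
-- def rev_subs(string, key):
--     n = len(key)
--     table = {}
--     for c in set(string):
--         val = ord(c) + n
--         if val > 255:
--             val -= 256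
--         table[ord(c)] = chr(val)
--     return string.translate(table)
-- ===== Notes on version B (the rewrite author's own statement) =====
-- stated objective: faster
-- what changed: Replaces the quadratic positional slice-rebuild loop with a translation table built once over the distinct characters and a single str.translate pass.
import Mathlib
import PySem

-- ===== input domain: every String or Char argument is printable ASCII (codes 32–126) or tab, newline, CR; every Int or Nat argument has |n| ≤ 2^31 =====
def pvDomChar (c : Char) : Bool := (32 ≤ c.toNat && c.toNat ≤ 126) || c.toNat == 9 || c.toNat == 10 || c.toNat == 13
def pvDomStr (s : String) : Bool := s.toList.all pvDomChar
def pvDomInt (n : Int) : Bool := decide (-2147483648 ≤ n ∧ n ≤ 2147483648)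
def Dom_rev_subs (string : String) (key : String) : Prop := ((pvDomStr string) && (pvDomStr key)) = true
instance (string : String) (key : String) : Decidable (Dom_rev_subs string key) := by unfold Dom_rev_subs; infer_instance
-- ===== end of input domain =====

-- B changes the algorithm: a translation table over the distinct characters plus one pass,
-- instead of A's per-index slice-rebuild; a timing run measures whether that is faster.

-- ===== PORT A =====
def rev_subs (string : String) (key : String) : String :=
  let n : Int := PySem.Str.len key
  let cs := string.toList
  let res := (PySem.List.pyRange 0 (cs.length : Int) 1).foldl
    (fun s i =>
      let val : Int := ((PySem.List.pyGetD s i ' ').toNat : Int) + n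
      let val := if val > 255 then val - 256 else val
      PySem.List.slice s none (some i)
        ++ [Char.ofNat val.toNat]
        ++ PySem.List.slice s (some (i + 1)) none)
    cs
  String.ofList res

-- ===== PORT B =====
def rev_subs_alt (string : String) (key : String) : String :=
  let n : Int := PySem.Str.len key
  let cs := string.toList
  let table : PySem.Dict Int Char :=
    (PySem.Set.ofList cs).foldl
      (fun d c =>
        let val : Int := (c.toNat : Int) + n
        let val := if val > 255 then val - 256 else val
        d.insert ((c.toNat : Int)) (Char.ofNat val.toNat)) PySem.Dict.empty
  String.ofList (cs.map (fun c => (table.get? ((c.toNat : Int))).getD c))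

-- ===== PRECONDITION & SPEC =====
def Spec_rev_subs (string : String) (key : String) (out : String) : Prop := out = rev_subs_alt string key
instance (string : String) (key : String) (out : String) : Decidable (Spec_rev_subs string key out) := by unfold Spec_rev_subs; infer_instance

-- ===== CLAIM (what is proved, stated in full; the proofs are below) =====
def Claim_equal_rev_subs : Prop := ∀ (string : String) (key : String), Dom_rev_subs string key → Spec_rev_subs string key (rev_subs string key)

-- ===== LEMMAS AND PROOFS =====

-- the common shift both programs apply to one character
def pvShift (n : Int) (c : Char) : Char :=
  let val : Int := (c.toNat : Int) + n
  let val := if val > 255 then val - 256 else val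
  Char.ofNat val.toNat


-- lookup in the dict built by inserting (key c, g c) for every c of l
theorem pv_get_foldl_insert (l : List Char) (d : PySem.Dict Int Char) (g : Char → Char) (c : Char)
    (h : d.get? ((c.toNat : Int)) = some (g c) ∨ c ∈ l) :
    ((l.foldl (fun d x => d.insert ((x.toNat : Int)) (g x)) d).get? ((c.toNat : Int))) = some (g c) := by
  induction l generalizing d with
  | nil => rw [List.foldl_nil]; exact h.resolve_right (by simp)
  | cons x xs ih =>
    simp only [List.foldl_cons]
    apply ih
    by_cases hx : x = c
    · subst hx; left; simp [PySem.Dict.get?_insert_self]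
    · rcases h with h | h
      · left
        rw [PySem.Dict.get?_insert_of_ne]
        · exact h
        · intro hc
          have hnat : x.toNat = c.toNat := by exact_mod_cast hc.symm
          exact hx (Char.ext (UInt32.toBitVec_inj.mp (BitVec.toNat_inj.mp hnat)))
      · right
        rcases List.mem_cons.mp h with h | h
        · exact absurd h.symm hx
        · exact h

theorem pv_alt_eq_map (string key : String) :
    rev_subs_alt string key = String.ofList (string.toList.map (pvShift (PySem.Str.len key))) := by
  show String.ofList (string.toList.map (fun c =>
      ((((PySem.Set.ofList string.toList).foldl
          (fun d c => d.insert ((c.toNat : Int)) (pvShift (PySem.Str.len key) c))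
          PySem.Dict.empty).get? ((c.toNat : Int))).getD c)))
    = String.ofList (string.toList.map (pvShift (PySem.Str.len key)))
  congr 1
  apply List.map_congr_left
  intro c hc
  rw [pv_get_foldl_insert _ _ _ _ (Or.inr (by simpa [PySem.Set.mem_ofList] using hc))]
  rfl

-- A's loop invariant: after the first i indices the string is mapped-prefix ++ untouched-suffix
theorem pv_a_loop (n : Int) (cs : List Char) (i : Nat) (hi : i ≤ cs.length) :
    (PySem.List.pyRange 0 (i : Int) 1).foldl
      (fun s j =>
        PySem.List.slice s none (some j)
          ++ [pvShift n (PySem.List.pyGetD s j ' ')]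
          ++ PySem.List.slice s (some (j + 1)) none)
      cs = (cs.take i).map (pvShift n) ++ cs.drop i := by
  induction i with
  | zero => simp [PySem.List.pyRange_one_eq_nil]
  | succ k ih =>
    have hk : k ≤ cs.length := Nat.le_of_succ_le hi
    have hrange : PySem.List.pyRange 0 ((k : Int) + 1) 1
        = PySem.List.pyRange 0 (k : Int) 1 ++ [(k : Int)] :=
      PySem.List.pyRange_one_succ_right (by positivity)
    have : ((k + 1 : Nat) : Int) = (k : Int) + 1 := by push_cast; ring
    rw [this, hrange, List.foldl_append, ih hk]
    simp only [List.foldl_cons, List.foldl_nil]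
    set s := (cs.take k).map (pvShift n) ++ cs.drop k with hs
    have hslen : s.length = cs.length := by
      simp [hs, Nat.min_eq_left hk]; omega
    have hklt : k < cs.length := hi
    -- the character read at index k is cs[k]
    have hget : PySem.List.pyGetD s (k : Int) ' ' = cs[k] := by
      rw [PySem.List.pyGetD_natCast]
      have : s[k]? = some cs[k] := by
        rw [hs, List.getElem?_append_right (by simp [Nat.min_eq_left hk])]
        simp [Nat.min_eq_left hk, List.getElem?_drop]
      simp [this]
    have hpre : PySem.List.slice s none (some (k : Int)) = (cs.take k).map (pvShift n) := by
      rw [PySem.List.slice_to_natCast, hs, List.take_append_of_le_length (by simp [Nat.min_eq_left hk])]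
      simp [Nat.min_eq_left hk]
    have hsuf : PySem.List.slice s (some ((k : Int) + 1)) none = cs.drop (k + 1) := by
      have h1 : ((k : Int) + 1) = ((k + 1 : Nat) : Int) := by push_cast; ring
      rw [h1, PySem.List.slice_from_natCast, hs]
      have h2 : k + 1 = ((cs.take k).map (pvShift n)).length + 1 := by
        simp [Nat.min_eq_left hk]
      rw [h2, List.drop_append, List.drop_drop]
      simp [Nat.min_eq_left hk]
    rw [hget, hpre, hsuf, List.take_add_one, List.getElem?_eq_getElem hklt]
    simp
    rw [List.take_add_one, List.getElem?_eq_getElem (by simpa using hklt)]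
    simp

theorem pv_a_eq_map (string key : String) :
    rev_subs string key = String.ofList (string.toList.map (pvShift (PySem.Str.len key))) := by
  show String.ofList ((PySem.List.pyRange 0 (string.toList.length : Int) 1).foldl
      (fun s i => PySem.List.slice s none (some i)
        ++ [pvShift (PySem.Str.len key) (PySem.List.pyGetD s i ' ')]
        ++ PySem.List.slice s (some (i + 1)) none) string.toList)
    = String.ofList (string.toList.map (pvShift (PySem.Str.len key)))
  congr 1
  rw [pv_a_loop (PySem.Str.len key) string.toList string.toList.length le_rfl,
    List.drop_length, List.append_nil, List.take_of_length_le (by simp)]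


-- ===== VERDICT (by name: the statement is the Claim_ definition above) =====
theorem rev_subs_spec : Claim_equal_rev_subs := by
  intro string key _
  unfold Spec_rev_subs
  rw [pv_a_eq_map, pv_alt_eq_map]
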